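-- pv_equiv track=rewrite | github.com/evensteven01/rs-logic-homeworks | src/Text/text_statistics.py | getTotalSentencesInText
-- ===== SOURCE A (Python) =====
-- def getTotalSentencesInText(text: str)-> int:
--     """
--         This function is to get the total numbers of sentences in text
--     """
--     num_of_sentences = 0
--
--     if text is None:
--         return num_of_sentences
--
--     sentences = text.split(".")
--
--     for sentence in sentences:
--         if sentence.strip() != "":
--             num_of_sentences += 1
--     return num_of_sentences
-- ===== SOURCE B (Python) =====
-- def getTotalSentencesInText(text: str) -> int:
--     """Single-pass scan: count period-terminated segments that contain a
--     non-whitespace character, plus a trailing such segment."""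
--     if text is None:
--         return 0
--     count = 0
--     has_content = False
--     for ch in text:
--         if ch == '.':
--             if has_content:
--                 count += 1
--             has_content = False
--         elif not ch.isspace():
--             has_content = True
--     if has_content:
--         count += 1
--     return count
-- ===== Notes on version B (the rewrite author's own statement) =====
-- stated objective: alternative
-- what changed: Replaces split-on-period plus per-segment strip with a single character scan that keeps a has-content flag and counts segments on the fly, without materializing substrings.
import Mathlib
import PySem

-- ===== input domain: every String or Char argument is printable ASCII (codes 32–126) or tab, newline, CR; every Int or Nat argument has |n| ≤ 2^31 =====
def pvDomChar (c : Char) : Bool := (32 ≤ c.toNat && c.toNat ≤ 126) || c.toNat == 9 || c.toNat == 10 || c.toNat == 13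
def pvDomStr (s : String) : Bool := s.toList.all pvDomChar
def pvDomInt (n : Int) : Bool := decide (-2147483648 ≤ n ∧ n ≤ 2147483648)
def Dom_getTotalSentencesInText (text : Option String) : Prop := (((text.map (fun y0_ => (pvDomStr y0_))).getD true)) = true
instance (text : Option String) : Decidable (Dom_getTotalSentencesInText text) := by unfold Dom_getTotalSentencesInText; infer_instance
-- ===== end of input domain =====

-- B replaces A's split-on-period-then-strip pass with a single character scan keeping a has-content flag (alternative decomposition, no substrings built).


-- ===== PORT A =====
def getTotalSentencesInText (text : Option String) : Int :=
  match text with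
  | none => 0
  | some s =>
      (PySem.Chars.splitOn s.toList ['.']).foldl
        (fun acc sentence => if PySem.Chars.strip sentence ≠ [] then acc + 1 else acc) 0

-- ===== PORT B =====
def getTotalSentencesInText_alt (text : Option String) : Int :=
  match text with
  | none => 0
  | some s =>
      let st := s.toList.foldl
        (fun (st : Int × Bool) ch =>
          if ch = '.' then (st.1 + (if st.2 then 1 else 0), false)
          else if !PySem.Chars.isspace ch then (st.1, true) else st)
        ((0 : Int), false)
      st.1 + (if st.2 then 1 else 0)

-- ===== PRECONDITION & SPEC =====
def Spec_getTotalSentencesInText (text : Option String) (out : Int) : Prop := out = getTotalSentencesInText_alt text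
instance (text : Option String) (out : Int) : Decidable (Spec_getTotalSentencesInText text out) := by unfold Spec_getTotalSentencesInText; infer_instance

-- ===== CLAIM (what is proved, stated in full; the proofs are below) =====
def Claim_equal_getTotalSentencesInText : Prop := ∀ (text : Option String), Dom_getTotalSentencesInText text → Spec_getTotalSentencesInText text (getTotalSentencesInText text)

-- ===== LEMMAS AND PROOFS =====

/-- Structural recursion computing `s.split('.')` for the single-char separator. -/
def splitDot : List Char → List (List Char)
  | [] => [[]]
  | c :: r =>
      if c = '.' then [] :: splitDot r
      else
        match splitDot r with
        | [] => [[c]]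
        | p :: ps => (c :: p) :: ps

lemma splitDot_ne_nil (l : List Char) : splitDot l ≠ [] := by
  cases l with
  | nil => simp [splitDot]
  | cons c r =>
      simp only [splitDot]
      split
      · simp
      · cases h : splitDot r <;> simp

lemma splitOn_go_eq (fuel : Nat) :
    ∀ (l cur : List Char) (acc : List (List Char)), l.length < fuel →
    PySem.Chars.splitOn.go ['.'] fuel l cur acc =
      acc.reverse ++
        (match splitDot l with
         | [] => []
         | p :: ps => (cur.reverse ++ p) :: ps) := by
  induction fuel with
  | zero => intro l cur acc h; omega
  | succ n ih =>
      intro l cur acc h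
      cases l with
      | nil => simp [PySem.Chars.splitOn.go, splitDot]
      | cons c rest =>
          simp only [PySem.Chars.splitOn.go]
          by_cases hc : c = '.'
          · subst hc
            rw [if_pos (by simp [List.isPrefixOf])]
            rw [ih _ _ _ (by simpa using Nat.lt_of_succ_lt_succ h)]
            simp only [splitDot]
            cases hs : splitDot rest with
            | nil => exact absurd hs (splitDot_ne_nil rest)
            | cons p ps => simp [hs]
          · rw [if_neg (by simp [List.isPrefixOf]; exact fun h' => hc h'.symm)]
            rw [ih _ _ _ (by simpa using Nat.lt_of_succ_lt_succ h)]
            simp only [splitDot, if_neg hc]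
            cases hs : splitDot rest with
            | nil => exact absurd hs (splitDot_ne_nil rest)
            | cons p ps => simp

lemma splitOn_dot_eq (s : List Char) :
    PySem.Chars.splitOn s ['.'] = splitDot s := by
  have h := splitOn_go_eq (s.length + 1) s [] [] (by omega)
  rw [PySem.Chars.splitOn, h]
  cases hs : splitDot s with
  | nil => exact absurd hs (splitDot_ne_nil s)
  | cons p ps => simp

lemma strip_cons_space (c : Char) (p : List Char) (h : PySem.Chars.isspace c = true) :
    PySem.Chars.strip (c :: p) = PySem.Chars.strip p := by
  simp [PySem.Chars.strip, PySem.Chars.lstrip, h]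

lemma strip_cons_nonspace_ne_nil (c : Char) (p : List Char) (h : ¬ PySem.Chars.isspace c = true) :
    PySem.Chars.strip (c :: p) ≠ [] := by
  simp only [PySem.Chars.strip, PySem.Chars.lstrip, PySem.Chars.rstrip,
    List.dropWhile_cons, h]
  intro hnil
  rw [List.reverse_eq_nil_iff, List.dropWhile_eq_nil_iff] at hnil
  exact h (hnil c (by simp))

/-- B's scan step. -/
def altStep (st : Int × Bool) (ch : Char) : Int × Bool :=
  if ch = '.' then (st.1 + (if st.2 then 1 else 0), false)
  else if !PySem.Chars.isspace ch then (st.1, true) else st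

/-- A's per-segment count over the tail segments. -/
def segCount : List (List Char) → Int
  | [] => 0
  | p :: ps => (if PySem.Chars.strip p ≠ [] then 1 else 0) + segCount ps

lemma foldl_segCount (l : List (List Char)) : ∀ (c : Int),
    l.foldl (fun acc sentence => if PySem.Chars.strip sentence ≠ [] then acc + 1 else acc) c
      = c + segCount l := by
  induction l with
  | nil => intro c; simp [segCount]
  | cons p ps ih =>
      intro c
      simp only [List.foldl_cons, segCount, ih]
      split <;> ring

lemma scan_eq_split (cs : List Char) : ∀ (c : Int) (h : Bool),
    (cs.foldl altStep (c, h)).1 + (if (cs.foldl altStep (c, h)).2 then 1 else 0)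
      = c + (match splitDot cs with
             | [] => 0
             | p :: ps => (if h = true ∨ PySem.Chars.strip p ≠ [] then 1 else 0) + segCount ps) := by
  induction cs with
  | nil =>
      intro c h
      simp only [List.foldl_nil, splitDot]
      have : PySem.Chars.strip ([] : List Char) = [] := rfl
      cases h <;> simp [this, segCount]
  | cons c0 rest ih =>
      intro c h
      simp only [List.foldl_cons]
      by_cases hc : c0 = '.'
      · subst hc
        have hstep : altStep (c, h) '.' = (c + (if h then 1 else 0), false) := rfl
        simp only [hstep]
        rw [ih]
        cases hs : splitDot rest with
        | nil => exact absurd hs (splitDot_ne_nil rest)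
        | cons p ps =>
            simp only [splitDot, hs]
            have hse : PySem.Chars.strip ([] : List Char) = [] := rfl
            cases h <;> (simp [segCount, hse]; try ring)
      · by_cases hsp : PySem.Chars.isspace c0 = true
        · have hstep : altStep (c, h) c0 = (c, h) := by
            simp [altStep, hc, hsp]
          simp only [hstep]
          rw [ih]
          cases hs : splitDot rest with
          | nil => exact absurd hs (splitDot_ne_nil rest)
          | cons p ps =>
              simp only [splitDot, if_neg hc, hs]
              rw [strip_cons_space c0 p hsp]
        · have hstep : altStep (c, h) c0 = (c, true) := by
            simp [altStep, hc, hsp]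
          simp only [hstep]
          rw [ih]
          cases hs : splitDot rest with
          | nil => exact absurd hs (splitDot_ne_nil rest)
          | cons p ps =>
              simp only [splitDot, if_neg hc, hs]
              have := strip_cons_nonspace_ne_nil c0 p hsp
              simp [this]

-- ===== VERDICT (by name: the statement is the Claim_ definition above) =====
theorem getTotalSentencesInText_spec : Claim_equal_getTotalSentencesInText := by
  intro text _
  unfold Spec_getTotalSentencesInText getTotalSentencesInText getTotalSentencesInText_alt
  cases text with
  | none => rfl
  | some s =>
      show (PySem.Chars.splitOn s.toList ['.']).foldl
              (fun acc sentence => if PySem.Chars.strip sentence ≠ [] then acc + 1 else acc) 0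
           = (s.toList.foldl altStep (0, false)).1 +
              (if (s.toList.foldl altStep (0, false)).2 then 1 else 0)
      rw [splitOn_dot_eq, scan_eq_split]
      cases hs : splitDot s.toList with
      | nil => exact absurd hs (splitDot_ne_nil s.toList)
      | cons p ps =>
          simp only [List.foldl_cons, Bool.false_eq_true, false_or]
          rw [foldl_segCount]
          split_ifs <;> ring
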